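-- pv_equiv track=rewrite | github.com/miliar/Code_Jam_Webscraper | solutions_python/Problem_155/3176.py | solveQuestion
-- ===== SOURCE A (Python) =====
-- def solveQuestion(smax, vals):
--     total = 0
--     needed = 0
--     for i, x in enumerate(vals):
--         if total < i and x > 0:
--             toAdd = (i - total)
--             needed += toAdd
--             total += toAdd
--         total += x
--     return needed
-- ===== SOURCE B (Python) =====
-- def solveQuestion(smax, vals):
--     prefix = [0]
--     for x in vals:
--         prefix.append(prefix[-1] + x)
--     return max((i - p for i, (x, p) in enumerate(zip(vals, prefix)) if x > 0),
--                default=0)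
-- ===== Notes on version B (the rewrite author's own statement) =====
-- stated objective: alternative
-- what changed: Two staged passes instead of A's single stateful loop: first build the list of prefix sums of vals, then take the max of the per-index deficits i - prefix[i] over positions with vals[i] > 0 (default 0), replacing A's conditional coin-injection into a mutated running total.
import Mathlib
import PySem

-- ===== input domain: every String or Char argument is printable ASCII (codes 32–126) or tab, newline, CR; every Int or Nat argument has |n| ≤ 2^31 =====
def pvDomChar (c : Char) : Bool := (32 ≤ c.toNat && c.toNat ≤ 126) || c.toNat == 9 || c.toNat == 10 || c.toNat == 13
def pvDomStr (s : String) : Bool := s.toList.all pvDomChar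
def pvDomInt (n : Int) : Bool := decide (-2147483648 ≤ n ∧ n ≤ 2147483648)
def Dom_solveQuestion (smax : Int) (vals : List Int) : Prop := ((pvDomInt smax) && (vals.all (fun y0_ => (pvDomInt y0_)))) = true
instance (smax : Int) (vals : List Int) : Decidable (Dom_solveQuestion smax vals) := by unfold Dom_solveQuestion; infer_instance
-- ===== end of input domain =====

-- B builds the prefix-sum list in a first pass, then returns the max deficit
-- i - prefix[i] over positions with vals[i] > 0 (default 0); A keeps one stateful loop.

-- ===== PORT A =====
def solveQuestion (smax : Int) (vals : List Int) : Int :=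
  (((PySem.List.enumerate vals).foldl
      (fun (st : Int × Int) (ix : Int × Int) =>
        let total := st.1
        let needed := st.2
        let i := ix.1
        let x := ix.2
        let st' :=
          if total < i ∧ x > 0 then
            let toAdd := i - total
            (total + toAdd, needed + toAdd)
          else (total, needed)
        (st'.1 + x, st'.2))
      (0, 0))).2

-- ===== PORT B =====
-- first pass of Source B: prefix = [0]; for x in vals: prefix.append(prefix[-1] + x)
def pvPrefixes : List Int → Int → List Int
  | [], s => [s]
  | x :: xs, s => s :: pvPrefixes xs (s + x)

-- second pass of Source B: max(i - p for i,(x,p) in enumerate(zip(vals,prefix)) if x > 0) with default 0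
def pvMaxDeficit : List (Int × Int) → Int → Int → Int
  | [], _, ans => ans
  | (x, p) :: rest, i, ans =>
      pvMaxDeficit rest (i + 1) (if x > 0 then max ans (i - p) else ans)

def solveQuestion_alt (smax : Int) (vals : List Int) : Int :=
  let pre := pvPrefixes vals 0
  pvMaxDeficit (vals.zip pre) 0 0

-- ===== PRECONDITION & SPEC =====
def Spec_solveQuestion (smax : Int) (vals : List Int) (out : Int) : Prop := out = solveQuestion_alt smax vals
instance (smax : Int) (vals : List Int) (out : Int) : Decidable (Spec_solveQuestion smax vals out) := by unfold Spec_solveQuestion; infer_instance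

-- ===== CLAIM (what is proved, stated in full; the proofs are below) =====
def Claim_equal_solveQuestion : Prop := ∀ (smax : Int) (vals : List Int), Dom_solveQuestion smax vals → Spec_solveQuestion smax vals (solveQuestion smax vals)

-- ===== LEMMAS AND PROOFS =====

-- Loop invariant: A's total = (running prefix sum) + A's needed, and needed = B's ans.
theorem solveQuestion_inv (vs : List Int) (k t n s a : Int)
    (ht : t = s + a) (hn : n = a) :
    ((PySem.List.enumerate vs k).foldl
      (fun (st : Int × Int) (ix : Int × Int) =>
        let total := st.1
        let needed := st.2
        let i := ix.1
        let x := ix.2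
        let st' :=
          if total < i ∧ x > 0 then
            let toAdd := i - total
            (total + toAdd, needed + toAdd)
          else (total, needed)
        (st'.1 + x, st'.2))
      (t, n)).2 =
    pvMaxDeficit (vs.zip (pvPrefixes vs s)) k a := by
  induction vs generalizing k t n s a with
  | nil => simpa [PySem.List.enumerate_nil, pvPrefixes, pvMaxDeficit] using hn
  | cons x xs ih =>
    simp only [PySem.List.enumerate_cons, List.foldl_cons, pvPrefixes, List.zip_cons_cons,
      pvMaxDeficit]
    by_cases h : t < k ∧ x > 0
    · simp only [if_pos h, if_pos h.2]
      exact ih _ _ _ _ _ (by omega) (by omega)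
    · simp only [if_neg h]
      by_cases hx : x > 0
      · simp only [if_pos hx]
        exact ih _ _ _ _ _ (by omega) (by omega)
      · simp only [if_neg hx]
        exact ih _ _ _ _ _ (by omega) hn

-- ===== VERDICT (by name: the statement is the Claim_ definition above) =====
theorem solveQuestion_spec : Claim_equal_solveQuestion := by
  intro smax vals _
  unfold Spec_solveQuestion solveQuestion solveQuestion_alt
  exact solveQuestion_inv vals 0 0 0 0 0 rfl rfl
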